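-- pv_equiv track=rewrite | github.com/Ranjit2002/pythonProgram | Exercises/sorting.py | replace_underscores
-- ===== SOURCE A (Python) =====
-- def replace_underscores(input_str, replace_chars):
--     result = ""
--     char_index = 0
--
--     for char in input_str:
--         if char == "_":
--             if char_index < len(replace_chars):
--                 result += replace_chars[char_index]
--                 char_index += 1
--         else:
--             result += char
--
--     return result
-- ===== SOURCE B (Python) =====
-- def replace_underscores(input_str, replace_chars):
--     parts = input_str.split("_")
--     head, rest = parts[0], parts[1:]
--     stitched = "".join(c + seg for c, seg in zip(replace_chars, rest))
--     leftover = "".join(rest[len(replace_chars):])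
--     return head + stitched + leftover
-- ===== Notes on version B (the rewrite author's own statement) =====
-- stated objective: faster
-- what changed: B splits the string on '_' once, zips the replacement characters with the later segments and joins, with leftover segments concatenated at the end, instead of A's character-by-character loop that appends to a string with += and maintains an index counter.
import Mathlib
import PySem

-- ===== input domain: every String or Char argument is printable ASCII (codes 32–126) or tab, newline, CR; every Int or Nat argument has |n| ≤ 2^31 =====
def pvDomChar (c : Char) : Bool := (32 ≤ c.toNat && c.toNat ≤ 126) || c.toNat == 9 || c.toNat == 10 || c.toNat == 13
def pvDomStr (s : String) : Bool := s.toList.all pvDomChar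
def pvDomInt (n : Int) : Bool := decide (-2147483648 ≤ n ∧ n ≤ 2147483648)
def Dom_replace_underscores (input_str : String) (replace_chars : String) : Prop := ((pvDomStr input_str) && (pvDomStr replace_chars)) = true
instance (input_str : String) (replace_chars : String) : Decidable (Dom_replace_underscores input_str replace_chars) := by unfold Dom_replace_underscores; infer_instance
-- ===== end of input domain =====

-- B splits once on '_' and rebuilds the string by zipping the replacement characters with
-- the later segments, appending any leftover segments; A scans character by character.

-- ===== PORT A =====
-- loop body of A: on '_' consume the next replacement char if any remain, else copy the char
def pvStepA (rcs : List Char) (st : List Char × Nat) (c : Char) : List Char × Nat :=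
  if c = '_' then
    if st.2 < rcs.length then (st.1 ++ [rcs.getD st.2 ' '], st.2 + 1) else st
  else (st.1 ++ [c], st.2)

def replace_underscores (input_str : String) (replace_chars : String) : String :=
  let rcs := replace_chars.toList
  String.mk (input_str.toList.foldl (pvStepA rcs) ([], 0)).1

-- ===== PORT B =====
def replace_underscores_alt (input_str : String) (replace_chars : String) : String :=
  let rcs := replace_chars.toList
  let parts := PySem.Chars.splitOn input_str.toList ['_']
  let head := parts.headD []
  let rest := parts.tail
  let stitched := (List.zipWith (fun c seg => c :: seg) rcs rest).flatten
  let leftover := (rest.drop rcs.length).flatten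
  String.mk (head ++ stitched ++ leftover)

-- ===== PRECONDITION & SPEC =====
def Spec_replace_underscores (input_str : String) (replace_chars : String) (out : String) : Prop := out = replace_underscores_alt input_str replace_chars
instance (input_str : String) (replace_chars : String) (out : String) : Decidable (Spec_replace_underscores input_str replace_chars out) := by unfold Spec_replace_underscores; infer_instance

-- ===== CLAIM (what is proved, stated in full; the proofs are below) =====
def Claim_equal_replace_underscores : Prop := ∀ (input_str : String) (replace_chars : String), Dom_replace_underscores input_str replace_chars → Spec_replace_underscores input_str replace_chars (replace_underscores input_str replace_chars)

-- ===== LEMMAS AND PROOFS =====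

-- prepend cur to the first piece (no-op on the empty list)
def pvCons (cur : List Char) : List (List Char) → List (List Char)
  | [] => []
  | p :: ps => (cur ++ p) :: ps

-- reference single-char split on '_'
def pvSp : List Char → List (List Char)
  | [] => [[]]
  | c :: cs => if c = '_' then [] :: pvSp cs else pvCons [c] (pvSp cs)

-- reference recursion for A's scan
def pvGoA (rcs : List Char) : List Char → Nat → List Char
  | [], _ => []
  | c :: cs, i =>
    if c = '_' then
      if i < rcs.length then rcs.getD i ' ' :: pvGoA rcs cs (i + 1) else pvGoA rcs cs i
    else c :: pvGoA rcs cs i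

-- stitch replacement chars between segments, flatten the leftover segments
def pvStitch : List Char → List (List Char) → List Char
  | _, [] => []
  | [], p :: ps => (p :: ps).flatten
  | c :: rs, p :: ps => c :: (p ++ pvStitch rs ps)

theorem pvSp_ne_nil (l : List Char) : pvSp l ≠ [] := by
  induction l with
  | nil => simp [pvSp]
  | cons c cs ih =>
    simp only [pvSp]
    split
    · simp
    · obtain ⟨p, ps, hp⟩ := List.exists_cons_of_ne_nil ih
      simp [hp, pvCons]

theorem pvGo_eq (fuel : Nat) (l cur : List Char) (acc : List (List Char))
    (h : l.length ≤ fuel) :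
    PySem.Chars.splitOn.go ['_'] fuel l cur acc = acc.reverse ++ pvCons cur.reverse (pvSp l) := by
  induction fuel generalizing l cur acc with
  | zero =>
    interval_cases hl : l.length
    · have : l = [] := List.eq_nil_of_length_eq_zero hl
      subst this
      simp [PySem.Chars.splitOn.go, pvSp, pvCons]
  | succ fuel ih =>
    cases l with
    | nil => simp [PySem.Chars.splitOn.go, pvSp, pvCons]
    | cons c rest =>
      obtain ⟨p, ps, hp⟩ := List.exists_cons_of_ne_nil (pvSp_ne_nil rest)
      by_cases hc : c = '_'
      · subst hc
        have hpre : List.isPrefixOf ['_'] ('_' :: rest) = true := by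
          simp [List.isPrefixOf]
        simp only [PySem.Chars.splitOn.go, hpre, if_pos, List.length_singleton,
          List.drop_succ_cons, List.drop_zero]
        rw [ih rest [] (cur.reverse :: acc) (by simpa using Nat.le_of_succ_le_succ h)]
        simp [pvSp, pvCons, hp]
      · have hpre : List.isPrefixOf ['_'] (c :: rest) = false := by
          simp [List.isPrefixOf]
          intro hceq; exact absurd hceq.symm hc
        simp only [PySem.Chars.splitOn.go, hpre, Bool.false_eq_true, if_false]
        rw [ih rest (c :: cur) acc (by simpa using Nat.le_of_succ_le_succ h)]
        simp [pvSp, hc, pvCons, hp]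

theorem splitOn_eq_pvSp (l : List Char) : PySem.Chars.splitOn l ['_'] = pvSp l := by
  rw [PySem.Chars.splitOn, pvGo_eq (l.length + 1) l [] [] (by omega)]
  obtain ⟨p, ps, hp⟩ := List.exists_cons_of_ne_nil (pvSp_ne_nil l)
  simp [hp, pvCons]

theorem foldA_eq (rcs : List Char) (cs : List Char) :
    ∀ (acc : List Char) (i : Nat),
      (cs.foldl (pvStepA rcs) (acc, i)).1 = acc ++ pvGoA rcs cs i := by
  induction cs with
  | nil => intro acc i; simp [pvGoA]
  | cons c cs ih =>
    intro acc i
    simp only [List.foldl_cons, pvStepA, pvGoA]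
    by_cases hc : c = '_'
    · by_cases hi : i < rcs.length
      · simp [hc, hi, ih]
      · simp [hc, hi, ih]
    · simp [hc, ih]

theorem pvStitch_nil (ps : List (List Char)) : pvStitch [] ps = ps.flatten := by
  cases ps <;> simp [pvStitch]

set_option maxRecDepth 8192 in
theorem pvGoA_eq_sp (rcs l : List Char) :
    ∀ i : Nat, pvGoA rcs l i = (pvSp l).headD [] ++ pvStitch (rcs.drop i) (pvSp l).tail := by
  induction l with
  | nil => intro i; simp [pvGoA, pvSp, pvStitch]
  | cons c rest ih =>
    intro i
    obtain ⟨p, ps, hp⟩ := List.exists_cons_of_ne_nil (pvSp_ne_nil rest)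
    by_cases hc : c = '_'
    · subst hc
      simp only [pvSp, if_pos]
      by_cases hi : i < rcs.length
      · have hdrop : rcs.drop i = rcs.getD i ' ' :: rcs.drop (i + 1) := by
          rw [List.drop_eq_getElem_cons hi]
          simp [List.getD, List.getElem?_eq_getElem hi]
        have hstep : pvGoA rcs ('_' :: rest) i = rcs.getD i ' ' :: pvGoA rcs rest (i + 1) := by
          simp [pvGoA, hi]
        rw [hstep, ih (i + 1), hp, hdrop]
        simp [pvStitch]
      · have hd : rcs.drop i = [] := List.drop_eq_nil_of_le (by omega)
        simp [pvGoA, hi, ih i, hp, hd, pvStitch_nil]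
    · simp [pvGoA, hc, pvSp, hp, pvCons, ih i]

-- the stitching recursion equals B's zip-and-leftover form
theorem pvStitch_eq_zip (rcs : List Char) (ps : List (List Char)) :
    pvStitch rcs ps =
      (List.zipWith (fun c seg => c :: seg) rcs ps).flatten ++ (ps.drop rcs.length).flatten := by
  induction rcs generalizing ps with
  | nil => simp [pvStitch_nil]
  | cons c rs ih =>
    cases ps with
    | nil => simp [pvStitch]
    | cons p ps => simp [pvStitch, ih]

-- ===== VERDICT (by name: the statement is the Claim_ definition above) =====
theorem replace_underscores_spec : Claim_equal_replace_underscores := by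
  intro input_str replace_chars _
  unfold Spec_replace_underscores replace_underscores replace_underscores_alt
  simp only [splitOn_eq_pvSp, foldA_eq]
  rw [pvGoA_eq_sp, List.drop_zero, pvStitch_eq_zip]
  simp
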